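-- pv_equiv track=rewrite | github.com/ClaraGhabro/metaheuristique | src/meta.py | find_abs_neigh
-- ===== SOURCE A (Python) =====
-- composant = [[1, 3, 5, 7, 9],
--              [2, 4, 6, 8, 10],
--              [11, 13, 15, 17, 19],
--              [12, 14, 16, 18, 20],
--              [21, 22, 23, 24, 25]]
--
-- def find_abs_neigh(neigh):
--     list_abs = []
--     for elt in neigh:
--         for i in range(5):
--             for j in range(5):
--                 if elt == composant[i][j]:
--                     list_abs.append(i)
--     return list_abs
-- ===== SOURCE B (Python) =====
-- def find_abs_neigh(neigh):
--     # The grid is regular: rows 0/1 interleave 1..10 (odd/even), rows 2/3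
--     # interleave 11..20 (odd/even), row 4 is 21..25.  So the row index is a
--     # closed-form arithmetic function of the value; no grid or table needed.
--     list_abs = []
--     for elt in neigh:
--         if 1 <= elt <= 20:
--             list_abs.append(2 * ((elt - 1) // 10) + (1 - elt % 2))
--         elif 21 <= elt <= 25:
--             list_abs.append(4)
--         # values outside 1..25 are not in the grid: skipped, as in the scan
--     return list_abs
-- ===== Notes on version B (the rewrite author's own statement) =====
-- stated objective: faster
-- what changed: The per-element 5x5 grid scan is replaced by a closed-form arithmetic formula exploiting the grid's regular structure (rows interleave odd/even decades), so no grid constant or table is consulted at all.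
import Mathlib
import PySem

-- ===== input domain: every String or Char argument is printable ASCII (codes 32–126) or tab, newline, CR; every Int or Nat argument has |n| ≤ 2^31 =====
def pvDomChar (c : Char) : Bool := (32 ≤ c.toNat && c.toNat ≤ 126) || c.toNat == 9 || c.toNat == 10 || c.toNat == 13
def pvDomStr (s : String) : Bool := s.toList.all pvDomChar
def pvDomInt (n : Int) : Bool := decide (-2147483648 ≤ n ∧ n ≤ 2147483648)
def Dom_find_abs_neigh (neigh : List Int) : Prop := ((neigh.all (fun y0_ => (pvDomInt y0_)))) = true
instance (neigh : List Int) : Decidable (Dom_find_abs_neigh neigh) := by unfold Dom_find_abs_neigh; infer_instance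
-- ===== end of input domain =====

-- B replaces the per-element 5x5 grid scan by a closed-form arithmetic formula for the row index (alternative algorithm; no table, no grid).

-- ===== PORT A =====
def composant : List (List Int) :=
  [[1, 3, 5, 7, 9],
   [2, 4, 6, 8, 10],
   [11, 13, 15, 17, 19],
   [12, 14, 16, 18, 20],
   [21, 22, 23, 24, 25]]

def find_abs_neigh (neigh : List Int) : List Int :=
  neigh.foldl (fun list_abs elt =>
    (PySem.List.pyRange 0 5 1).foldl (fun acc i =>
      (PySem.List.pyRange 0 5 1).foldl (fun acc j =>
        match PySem.List.pyGet? composant i with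
        | none => acc
        | some row =>
          match PySem.List.pyGet? row j with
          | none => acc
          | some v => if elt == v then acc ++ [i] else acc) acc) list_abs) []

-- ===== PORT B =====
-- closed-form row index of a grid value; none if the value is not in the grid
def rowOf (elt : Int) : Option Int :=
  if 1 ≤ elt ∧ elt ≤ 20 then
    some (2 * (PySem.Int.floordiv (elt - 1) 10) + (1 - PySem.Int.mod elt 2))
  else if 21 ≤ elt ∧ elt ≤ 25 then some 4
  else none

def find_abs_neigh_alt (neigh : List Int) : List Int :=
  neigh.foldl (fun list_abs elt =>
    match rowOf elt with
    | some r => list_abs ++ [r]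
    | none => list_abs) []

-- ===== PRECONDITION & SPEC =====
def Spec_find_abs_neigh (neigh : List Int) (out : List Int) : Prop := out = find_abs_neigh_alt neigh
instance (neigh : List Int) (out : List Int) : Decidable (Spec_find_abs_neigh neigh out) := by unfold Spec_find_abs_neigh; infer_instance

-- ===== CLAIM (what is proved, stated in full; the proofs are below) =====
def Claim_equal_find_abs_neigh : Prop := ∀ (neigh : List Int), Dom_find_abs_neigh neigh → Spec_find_abs_neigh neigh (find_abs_neigh neigh)

-- ===== LEMMAS AND PROOFS =====

-- A's inner double loop over the grid appends exactly the closed-form row lookup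
theorem pvStep (elt : Int) (acc : List Int) :
    (PySem.List.pyRange 0 5 1).foldl (fun acc i =>
      (PySem.List.pyRange 0 5 1).foldl (fun acc j =>
        match PySem.List.pyGet? composant i with
        | none => acc
        | some row =>
          match PySem.List.pyGet? row j with
          | none => acc
          | some v => if elt == v then acc ++ [i] else acc) acc) acc
    = acc ++ (rowOf elt).toList := by
  by_cases h : 1 ≤ elt ∧ elt ≤ 25
  · obtain ⟨h1, h2⟩ := h
    interval_cases elt <;> rfl
  · have h1 : elt ≠ 1 := by omega
    have h2 : elt ≠ 2 := by omega
    have h3 : elt ≠ 3 := by omega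
    have h4 : elt ≠ 4 := by omega
    have h5 : elt ≠ 5 := by omega
    have h6 : elt ≠ 6 := by omega
    have h7 : elt ≠ 7 := by omega
    have h8 : elt ≠ 8 := by omega
    have h9 : elt ≠ 9 := by omega
    have h10 : elt ≠ 10 := by omega
    have h11 : elt ≠ 11 := by omega
    have h12 : elt ≠ 12 := by omega
    have h13 : elt ≠ 13 := by omega
    have h14 : elt ≠ 14 := by omega
    have h15 : elt ≠ 15 := by omega
    have h16 : elt ≠ 16 := by omega
    have h17 : elt ≠ 17 := by omega
    have h18 : elt ≠ 18 := by omega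
    have h19 : elt ≠ 19 := by omega
    have h20 : elt ≠ 20 := by omega
    have h21 : elt ≠ 21 := by omega
    have h22 : elt ≠ 22 := by omega
    have h23 : elt ≠ 23 := by omega
    have h24 : elt ≠ 24 := by omega
    have h25 : elt ≠ 25 := by omega
    have hr : rowOf elt = none := by
      unfold rowOf
      split_ifs with ha hb
      · exfalso; omega
      · exfalso; omega
      · rfl
    rw [hr]
    simp [PySem.List.pyRange, PySem.List.pyGet?, PySem.List.pyIdx?, composant,
      List.range_succ,
      h1, h2, h3, h4, h5, h6, h7, h8, h9, h10, h11, h12, h13, h14,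
      h15, h16, h17, h18, h19, h20, h21, h22, h23, h24, h25]

theorem pvFold (neigh acc : List Int) :
    neigh.foldl (fun list_abs elt => list_abs ++ (rowOf elt).toList) acc
    = neigh.foldl (fun list_abs elt =>
        match rowOf elt with
        | some r => list_abs ++ [r]
        | none => list_abs) acc := by
  induction neigh generalizing acc with
  | nil => rfl
  | cons x xs ih =>
    simp only [List.foldl_cons]
    cases rowOf x <;> simp [ih]

-- ===== VERDICT (by name: the statement is the Claim_ definition above) =====
theorem find_abs_neigh_spec : Claim_equal_find_abs_neigh := by
  intro neigh _
  unfold Spec_find_abs_neigh find_abs_neigh find_abs_neigh_alt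
  simp only [pvStep]
  exact pvFold neigh []
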